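-- pv_equiv track=rewrite | github.com/code-cp/leetcode | solutions/1640/main.py | canFormArray
-- ===== SOURCE A (Python) =====
-- from typing import List
--
-- def canFormArray(arr: List[int], pieces: List[List[int]]) -> bool:
--     def bsearch(v, arr):
--         l, r = 0, len(arr)-1
--         while l <= r:
--             mid = (r-l)//2+l
--             if arr[mid][0] < v:
--                 l += 1
--             elif arr[mid][0] > v:
--                 r -= 1
--             else:
--                 return mid
--         return -1
--
--     i = 0
--     pieces.sort(key=lambda x: x[0])
--     while i < len(arr):
--         v = arr[i]
--         idx = bsearch(v, pieces)
--         if idx == -1: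
--             return False
--         for j in range(len(pieces[idx])):
--             if i >= len(arr):
--                 return False
--             if pieces[idx][j] == arr[i]:
--                 i += 1
--             else:
--                 return False
--     return True
-- ===== SOURCE B (Python) =====
-- from typing import List
--
-- def canFormArray(arr: List[int], pieces: List[List[int]]) -> bool:
--     n = len(arr)
--     reach = [False] * (n + 1)
--     reach[0] = True
--     for i in range(n):
--         if reach[i]:
--             for p in pieces:
--                 if arr[i:i+len(p)] == p:
--                     reach[i + len(p)] = True
--     return reach[n]
-- ===== Notes on version B (the rewrite author's own statement) =====
-- stated objective: alternative
-- what changed: Replaced A's greedy single-pointer scan (sort pieces in place, step-by-one binary search per position, element-wise march) by a word-break style dynamic program: a reachability table over prefix lengths of arr, filled left to right by trying every piece at each reachable position.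
-- outside the precondition, e.g. on canFormArray([1, 3], [[1, 2], [1, 3]]): A returns False, B returns True; on canFormArray([], [[]]): A raises IndexError, B returns True
import Mathlib
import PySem

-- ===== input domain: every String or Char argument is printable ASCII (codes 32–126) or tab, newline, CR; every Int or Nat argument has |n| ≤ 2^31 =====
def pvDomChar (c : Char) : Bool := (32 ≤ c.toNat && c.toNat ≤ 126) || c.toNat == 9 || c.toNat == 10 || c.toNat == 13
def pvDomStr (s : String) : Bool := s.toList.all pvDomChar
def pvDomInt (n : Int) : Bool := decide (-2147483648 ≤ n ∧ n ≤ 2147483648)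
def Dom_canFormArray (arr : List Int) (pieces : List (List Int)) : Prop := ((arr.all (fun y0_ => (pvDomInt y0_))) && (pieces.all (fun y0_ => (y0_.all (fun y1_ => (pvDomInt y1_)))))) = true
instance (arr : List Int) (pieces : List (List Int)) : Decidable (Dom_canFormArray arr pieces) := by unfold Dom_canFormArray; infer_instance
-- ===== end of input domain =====

-- B replaces A's greedy pointer (sort pieces + step-by-one binary search + element-wise march) by a
-- word-break style dynamic program over prefix lengths of arr; A sorts `pieces` in place (a side effect
-- B does not reproduce); the claim is about the return value only.

-- ===== PORT A =====
-- A's inner `bsearch` while-loop (note: it moves l/r by 1, not to mid±1, exactly as the Python does)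
def pvBsearchA (v : Int) (ps : List (List Int)) (l r : Int) : Int :=
  if _h : l ≤ r then
    let mid := PySem.Int.floordiv (r - l) 2 + l
    let first := (PySem.List.pyGetD ps mid []).headD 0   -- arr[mid][0] (headD: piece nonempty under Pre_)
    if first < v then pvBsearchA v ps (l + 1) r
    else if v < first then pvBsearchA v ps l (r - 1)
    else mid
  else -1
termination_by (r - l + 1).toNat
decreasing_by all_goals omega

-- A's inner `for j in range(len(pieces[idx]))` loop: returns the advanced i, or none for `return False`
def pvTakeA (p : List Int) (arr : List Int) (i : Int) : Option Int :=
  match p with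
  | [] => some i
  | x :: rest =>
      if i ≥ (arr.length : Int) then none
      else if x = PySem.List.pyGetD arr i 0 then pvTakeA rest arr (i + 1)
      else none

-- A's outer while-loop (fuel ≥ |arr| + 1 suffices: i strictly increases each round when pieces are nonempty)
def pvLoopA (sp : List (List Int)) (arr : List Int) : Nat → Int → Bool
  | 0, _ => false
  | fuel + 1, i =>
      if i < (arr.length : Int) then
        let v := PySem.List.pyGetD arr i 0
        let idx := pvBsearchA v sp 0 ((sp.length : Int) - 1)
        if idx = -1 then false
        else
          match pvTakeA (PySem.List.pyGetD sp idx []) arr i with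
          | none => false
          | some i' => pvLoopA sp arr fuel i'
      else true

def canFormArray (arr : List Int) (pieces : List (List Int)) : Bool :=
  pvLoopA (PySem.List.sorted pieces (fun p => p.headD 0) false) arr (arr.length + 1) 0

-- ===== PORT B =====
-- B's inner `for p in pieces` loop: reach[i + len(p)] = True for every piece matching arr at i
def pvInnerB (arr : List Int) (pieces : List (List Int)) (i : Nat) (r : List Bool) : List Bool :=
  pieces.foldl
    (fun r p =>
      if PySem.List.slice arr (some (i : Int)) (some ((i : Int) + (p.length : Int))) = p
      then r.set (i + p.length) true else r)
    r

-- B: reach = [False]*(n+1); reach[0] = True; for i in range(n): if reach[i]: inner loop; return reach[n]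
def canFormArray_alt (arr : List Int) (pieces : List (List Int)) : Bool :=
  ((List.range arr.length).foldl
      (fun r i => if r.getD i false then pvInnerB arr pieces i r else r)
      ((List.replicate (arr.length + 1) false).set 0 true)).getD arr.length false

-- ===== PRECONDITION & SPEC =====
-- Pre_ excludes inputs with an empty piece (A raises IndexError on the sort key `x[0]`) and inputs whose
-- pieces have duplicate first elements, on which A commits to the one piece its sort order happens to
-- put first while B considers every tiling — an unspecified corner where both answers are defensible.
def Pre_canFormArray (arr : List Int) (pieces : List (List Int)) : Prop :=
  (∀ p ∈ pieces, p ≠ []) ∧ (pieces.map (fun p => p.headD 0)).Nodup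
instance (arr : List Int) (pieces : List (List Int)) : Decidable (Pre_canFormArray arr pieces) := by
  unfold Pre_canFormArray; infer_instance

def pvWitness_canFormArray : List Int × List (List Int) := ([1, 2, 3, 4], [[4], [1, 2], [3]])

def Spec_canFormArray (arr : List Int) (pieces : List (List Int)) (out : Bool) : Prop := out = canFormArray_alt arr pieces
instance (arr : List Int) (pieces : List (List Int)) (out : Bool) : Decidable (Spec_canFormArray arr pieces out) := by unfold Spec_canFormArray; infer_instance

-- ===== CLAIM (what is proved, stated in full; the proofs are below) =====
def Claim_equal_canFormArray : Prop := ∀ (arr : List Int) (pieces : List (List Int)), Dom_canFormArray arr pieces → Pre_canFormArray arr pieces → Spec_canFormArray arr pieces (canFormArray arr pieces)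

-- ===== LEMMAS AND PROOFS =====

-- The common semantic core both ports are reduced to: the (unique, under Pre_) piece matching arr at
-- position i, the deterministic step function it induces, its iteration from 0, and reachability.
def pvCond (arr : List Int) (i : Nat) (p : List Int) : Bool :=
  decide ((arr.drop i).take p.length = p)

def pvStep (arr : List Int) (pieces : List (List Int)) (i : Nat) : Option Nat :=
  (pieces.find? (pvCond arr i)).map (fun p => i + p.length)

def pvIter (arr : List Int) (pieces : List (List Int)) : Nat → Option Nat
  | 0 => some 0
  | t + 1 => (pvIter arr pieces t).bind (pvStep arr pieces)

def pvReach (arr : List Int) (pieces : List (List Int)) (j : Nat) : Prop :=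
  ∃ t, pvIter arr pieces t = some j

theorem pv_match_head (arr p : List Int) (i : Nat) (hp : p ≠ [])
    (h : (arr.drop i).take p.length = p) :
    i < arr.length ∧ i + p.length ≤ arr.length ∧ p.headD 0 = arr.getD i 0 := by
  have hlen := congrArg List.length h
  simp [List.length_take, List.length_drop] at hlen
  have hplen : 0 < p.length := List.length_pos_iff.mpr hp
  have h1 : i < arr.length := by omega
  have h2 : i + p.length ≤ arr.length := by omega
  refine ⟨h1, h2, ?_⟩
  have hdrop : arr.drop i = arr[i] :: arr.drop (i + 1) := (List.getElem_cons_drop h1).symm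
  obtain ⟨k, hk⟩ : ∃ k, p.length = k + 1 := ⟨p.length - 1, by omega⟩
  rw [hdrop, hk, List.take_succ_cons] at h
  rw [← h, List.getD_eq_getElem arr 0 h1]
  rfl

theorem pv_cond_unique (arr : List Int) (pieces : List (List Int))
    (hne : ∀ p ∈ pieces, p ≠ []) (hnd : (pieces.map (fun p => p.headD 0)).Nodup)
    (i : Nat) (p q : List Int) (hp : p ∈ pieces) (hq : q ∈ pieces)
    (hcp : pvCond arr i p = true) (hcq : pvCond arr i q = true) : p = q := by
  have hp' := of_decide_eq_true hcp
  have hq' := of_decide_eq_true hcq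
  have h1 := pv_match_head arr p i (hne p hp) hp'
  have h2 := pv_match_head arr q i (hne q hq) hq'
  exact List.inj_on_of_nodup_map hnd hp hq (by rw [h1.2.2, h2.2.2])

theorem pv_find_some (arr : List Int) (pieces : List (List Int))
    (hne : ∀ p ∈ pieces, p ≠ []) (hnd : (pieces.map (fun p => p.headD 0)).Nodup)
    (i : Nat) (p : List Int) (hp : p ∈ pieces) (hcp : pvCond arr i p = true) :
    pieces.find? (pvCond arr i) = some p := by
  have hs : (pieces.find? (pvCond arr i)).isSome := List.find?_isSome.mpr ⟨p, hp, hcp⟩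
  obtain ⟨q, hq⟩ := Option.isSome_iff_exists.mp hs
  have hqm := List.mem_of_find?_eq_some hq
  have hqc : pvCond arr i q = true := List.find?_some hq
  rw [hq, pv_cond_unique arr pieces hne hnd i q p hqm hp hqc hcp]

theorem pv_step_bounds (arr : List Int) (pieces : List (List Int))
    (hne : ∀ p ∈ pieces, p ≠ []) (i j : Nat) (h : pvStep arr pieces i = some j) :
    i < j ∧ j ≤ arr.length := by
  unfold pvStep at h
  cases hf : pieces.find? (pvCond arr i) with
  | none => rw [hf] at h; simp at h
  | some p =>
      rw [hf] at h
      simp only [Option.map_some, Option.some.injEq] at h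
      have hpm := List.mem_of_find?_eq_some hf
      have hpc0 : pvCond arr i p = true := List.find?_some hf
      unfold pvCond at hpc0
      have hpc := of_decide_eq_true hpc0
      have hb := pv_match_head arr p i (hne p hpm) hpc
      have hplen : 0 < p.length := List.length_pos_iff.mpr (hne p hpm)
      omega

theorem pv_iter_none_stable (arr : List Int) (pieces : List (List Int)) (t : Nat)
    (h : pvIter arr pieces t = none) : ∀ s, pvIter arr pieces (t + s) = none := by
  intro s
  induction s with
  | zero => exact h
  | succ s ih => show (pvIter arr pieces (t + s)).bind _ = none; rw [ih]; rfl

theorem pv_iter_le (arr : List Int) (pieces : List (List Int))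
    (hne : ∀ p ∈ pieces, p ≠ []) (t : Nat) (a : Nat) (ha : pvIter arr pieces t = some a) :
    ∀ s b, pvIter arr pieces (t + s) = some b → a ≤ b := by
  intro s
  induction s with
  | zero =>
      intro b hb
      rw [Nat.add_zero, ha] at hb
      simp only [Option.some.injEq] at hb
      omega
  | succ s ih =>
      intro b hb
      have : (pvIter arr pieces (t + s)).bind (pvStep arr pieces) = some b := hb
      cases hc : pvIter arr pieces (t + s) with
      | none => rw [hc] at this; simp at this
      | some c =>
          rw [hc] at this
          simp only [Option.bind_some] at this
          have h1 := ih c hc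
          have h2 := pv_step_bounds arr pieces hne c b this
          omega

theorem pv_reach_zero (arr : List Int) (pieces : List (List Int)) : pvReach arr pieces 0 :=
  ⟨0, rfl⟩

theorem pv_reach_succ (arr : List Int) (pieces : List (List Int)) (i j : Nat)
    (hi : pvReach arr pieces i) (h : pvStep arr pieces i = some j) : pvReach arr pieces j := by
  obtain ⟨t, ht⟩ := hi
  exact ⟨t + 1, by show (pvIter arr pieces t).bind _ = some j; rw [ht]; simpa using h⟩

theorem pv_reach_pred (arr : List Int) (pieces : List (List Int)) (j : Nat)
    (hj : pvReach arr pieces j) (h0 : j ≠ 0) :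
    ∃ i, pvReach arr pieces i ∧ pvStep arr pieces i = some j := by
  obtain ⟨t, ht⟩ := hj
  cases t with
  | zero => simp [pvIter] at ht; omega
  | succ t =>
      have : (pvIter arr pieces t).bind (pvStep arr pieces) = some j := ht
      cases hc : pvIter arr pieces t with
      | none => rw [hc] at this; simp at this
      | some i =>
          rw [hc] at this
          simp only [Option.bind_some] at this
          exact ⟨i, ⟨t, hc⟩, this⟩

theorem pv_reach_le_of_dead (arr : List Int) (pieces : List (List Int))
    (hne : ∀ p ∈ pieces, p ≠ []) (i : Nat) (hi : pvReach arr pieces i)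
    (hdead : pvStep arr pieces i = none) : ∀ j, pvReach arr pieces j → j ≤ i := by
  obtain ⟨ti, hti⟩ := hi
  intro j hj
  obtain ⟨tj, htj⟩ := hj
  by_cases hle : tj ≤ ti
  · obtain ⟨s, hs⟩ : ∃ s, ti = tj + s := ⟨ti - tj, by omega⟩
    exact pv_iter_le arr pieces hne tj j htj s i (hs ▸ hti)
  · exfalso
    have hnone : pvIter arr pieces (ti + 1) = none := by
      show (pvIter arr pieces ti).bind _ = none
      rw [hti]; simpa using hdead
    have := pv_iter_none_stable arr pieces (ti + 1) hnone (tj - ti - 1)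
    rw [show ti + 1 + (tj - ti - 1) = tj by omega, htj] at this
    simp at this

-- ---- B side: the DP fold computes exactly reachability ----

theorem pv_inner_nomatch (arr : List Int) (i : Nat) :
    ∀ (l : List (List Int)) (r : List Bool), (∀ p ∈ l, pvCond arr i p = false) →
    pvInnerB arr l i r = r := by
  intro l
  induction l with
  | nil => intro r _; rfl
  | cons p ps ih =>
      intro r h
      have hp := h p (List.mem_cons_self)
      unfold pvInnerB
      rw [List.foldl_cons]
      have hcond : ¬ (PySem.List.slice arr (some (i : Int)) (some ((i : Int) + (p.length : Int))) = p) := by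
        rw [PySem.List.slice_natCast_add]
        simpa [pvCond] using hp
      rw [if_neg hcond]
      exact ih r (fun q hq => h q (List.mem_cons_of_mem p hq))

theorem pv_inner_char (arr : List Int) (i : Nat) :
    ∀ (l : List (List Int)) (r : List Bool), (∀ p ∈ l, p ≠ []) →
    ((l.map (fun p => p.headD 0)).Nodup) →
    pvInnerB arr l i r =
      (match l.find? (pvCond arr i) with
       | none => r
       | some p => r.set (i + p.length) true) := by
  intro l
  induction l with
  | nil => intro r _ _; rfl
  | cons p ps ih =>
      intro r hne hnd
      rw [List.map_cons, List.nodup_cons] at hnd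
      unfold pvInnerB
      rw [List.foldl_cons]
      by_cases hc : pvCond arr i p = true
      · have hcond : PySem.List.slice arr (some (i : Int)) (some ((i : Int) + (p.length : Int))) = p := by
          rw [PySem.List.slice_natCast_add]
          exact of_decide_eq_true hc
        rw [if_pos hcond, List.find?_cons_of_pos hc]
        have hno : ∀ q ∈ ps, pvCond arr i q = false := by
          intro q hq
          by_contra hqc
          have hqc' : pvCond arr i q = true := by
            cases h : pvCond arr i q
            · exact absurd h hqc
            · rfl
          have h1 := pv_match_head arr p i (hne p List.mem_cons_self) (of_decide_eq_true hc)
          have h2 := pv_match_head arr q i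
            (hne q (List.mem_cons_of_mem p hq)) (of_decide_eq_true hqc')
          exact hnd.1 (List.mem_map.mpr ⟨q, hq, by rw [h2.2.2, h1.2.2]⟩)
        exact pv_inner_nomatch arr i ps _ hno
      · have hcond : ¬ (PySem.List.slice arr (some (i : Int)) (some ((i : Int) + (p.length : Int))) = p) := by
          rw [PySem.List.slice_natCast_add]
          intro hh
          exact hc (decide_eq_true hh)
        rw [if_neg hcond, List.find?_cons_of_neg (by simpa using hc)]
        exact ih r (fun q hq => hne q (List.mem_cons_of_mem p hq)) hnd.2

-- the invariant of B's fold over range k: positions are marked exactly when reachable with a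
-- predecessor already processed (position 0 is marked from the start)
theorem pv_dp_inv (arr : List Int) (pieces : List (List Int))
    (hne : ∀ p ∈ pieces, p ≠ []) (hnd : (pieces.map (fun p => p.headD 0)).Nodup) :
    ∀ k, k ≤ arr.length →
    (((List.range k).foldl (fun r i => if r.getD i false then pvInnerB arr pieces i r else r)
        ((List.replicate (arr.length + 1) false).set 0 true)).length = arr.length + 1) ∧
    (∀ j, j ≤ arr.length →
      (((List.range k).foldl (fun r i => if r.getD i false then pvInnerB arr pieces i r else r)
          ((List.replicate (arr.length + 1) false).set 0 true)).getD j false = true ↔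
        (pvReach arr pieces j ∧ (j = 0 ∨ ∃ i, i < k ∧ pvReach arr pieces i ∧ pvStep arr pieces i = some j)))) := by
  intro k
  induction k with
  | zero =>
      intro _
      constructor
      · simp
      · intro j hj
        simp only [List.range_zero, List.foldl_nil]
        by_cases hj0 : j = 0
        · subst hj0
          simp [List.getD_eq_getElem?_getD, pv_reach_zero arr pieces]
        · constructor
          · intro h
            exfalso
            rw [List.getD_eq_getElem?_getD, List.getElem?_set_ne (by omega)] at h
            by_cases hjl : j < arr.length + 1
            · simp [hjl] at h
            · rw [List.getElem?_eq_none (by simp; omega)] at h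
              simp at h
          · rintro ⟨_, hw⟩
            rcases hw with h0 | ⟨i, hi, _⟩
            · exact absurd h0 hj0
            · omega
  | succ k ih =>
      intro hk
      obtain ⟨ihlen, ihspec⟩ := ih (by omega)
      set Rk := (List.range k).foldl (fun r i => if r.getD i false then pvInnerB arr pieces i r else r)
        ((List.replicate (arr.length + 1) false).set 0 true) with hRk
      have hfold : (List.range (k + 1)).foldl
          (fun r i => if r.getD i false then pvInnerB arr pieces i r else r)
          ((List.replicate (arr.length + 1) false).set 0 true)
          = (if Rk.getD k false then pvInnerB arr pieces k Rk else Rk) := by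
        rw [List.range_succ, List.foldl_append, List.foldl_cons, List.foldl_nil]
      by_cases hb : Rk.getD k false = true
      · -- position k is reachable; the inner loop fires
        have hreachk : pvReach arr pieces k := ((ihspec k (by omega)).mp hb).1
        rw [hfold, if_pos hb, pv_inner_char arr k pieces Rk hne hnd]
        cases hf : pieces.find? (pvCond arr k) with
        | none =>
            -- no piece matches at k: nothing changes, and no new witness i = k can appear
            have hstep : pvStep arr pieces k = none := by unfold pvStep; rw [hf]; rfl
            refine ⟨ihlen, fun j hj => ?_⟩
            rw [ihspec j hj]
            constructor
            · rintro ⟨hr, hw⟩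
              refine ⟨hr, ?_⟩
              rcases hw with h0 | ⟨i, hi, hri, hsi⟩
              · exact Or.inl h0
              · exact Or.inr ⟨i, by omega, hri, hsi⟩
            · rintro ⟨hr, hw⟩
              refine ⟨hr, ?_⟩
              rcases hw with h0 | ⟨i, hi, hri, hsi⟩
              · exact Or.inl h0
              · rcases Nat.lt_succ_iff_lt_or_eq.mp hi with hik | hik
                · exact Or.inr ⟨i, hik, hri, hsi⟩
                · subst hik
                  rw [hstep] at hsi
                  simp at hsi
        | some p =>
            -- the unique piece p matches at k: exactly position k + |p| is newly marked
            have hstep : pvStep arr pieces k = some (k + p.length) := by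
              unfold pvStep; rw [hf]; rfl
            have hbnd := pv_step_bounds arr pieces hne k (k + p.length) hstep
            have hreachj := pv_reach_succ arr pieces k (k + p.length) hreachk hstep
            refine ⟨by rw [List.length_set]; exact ihlen, fun j hj => ?_⟩
            by_cases hjj : j = k + p.length
            · subst hjj
              have hget : (Rk.set (k + p.length) true).getD (k + p.length) false = true := by
                rw [List.getD_eq_getElem?_getD, List.getElem?_set_self (by omega)]
                rfl
              rw [hget]
              simp only [true_iff]
              exact ⟨hreachj, Or.inr ⟨k, by omega, hreachk, hstep⟩⟩
            · have hget : (Rk.set (k + p.length) true).getD j false = Rk.getD j false := by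
                rw [List.getD_eq_getElem?_getD, List.getElem?_set_ne (by omega),
                  ← List.getD_eq_getElem?_getD]
              rw [hget, ihspec j hj]
              constructor
              · rintro ⟨hr, hw⟩
                refine ⟨hr, ?_⟩
                rcases hw with h0 | ⟨i, hi, hri, hsi⟩
                · exact Or.inl h0
                · exact Or.inr ⟨i, by omega, hri, hsi⟩
              · rintro ⟨hr, hw⟩
                refine ⟨hr, ?_⟩
                rcases hw with h0 | ⟨i, hi, hri, hsi⟩
                · exact Or.inl h0
                · rcases Nat.lt_succ_iff_lt_or_eq.mp hi with hik | hik
                  · exact Or.inr ⟨i, hik, hri, hsi⟩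
                  · subst hik
                    rw [hstep] at hsi
                    simp only [Option.some.injEq] at hsi
                    exact absurd hsi.symm hjj
      · -- position k is not reachable: the body is skipped and k can be no witness either
        have hnr : ¬ pvReach arr pieces k := by
          intro hr
          by_cases hk0 : k = 0
          · subst hk0
            exact hb ((ihspec 0 (by omega)).mpr ⟨pv_reach_zero arr pieces, Or.inl rfl⟩)
          · obtain ⟨i, hri, hsi⟩ := pv_reach_pred arr pieces k hr hk0
            have hib := pv_step_bounds arr pieces hne i k hsi
            exact hb ((ihspec k (by omega)).mpr ⟨hr, Or.inr ⟨i, by omega, hri, hsi⟩⟩)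
        rw [hfold, if_neg hb]
        refine ⟨ihlen, fun j hj => ?_⟩
        rw [ihspec j hj]
        constructor
        · rintro ⟨hr, hw⟩
          refine ⟨hr, ?_⟩
          rcases hw with h0 | ⟨i, hi, hri, hsi⟩
          · exact Or.inl h0
          · exact Or.inr ⟨i, by omega, hri, hsi⟩
        · rintro ⟨hr, hw⟩
          refine ⟨hr, ?_⟩
          rcases hw with h0 | ⟨i, hi, hri, hsi⟩
          · exact Or.inl h0
          · rcases Nat.lt_succ_iff_lt_or_eq.mp hi with hik | hik
            · exact Or.inr ⟨i, hik, hri, hsi⟩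
            · subst hik
              exact absurd hri hnr

theorem pv_dp_result (arr : List Int) (pieces : List (List Int))
    (hne : ∀ p ∈ pieces, p ≠ []) (hnd : (pieces.map (fun p => p.headD 0)).Nodup) :
    (canFormArray_alt arr pieces = true ↔ pvReach arr pieces arr.length) := by
  unfold canFormArray_alt
  rw [(pv_dp_inv arr pieces hne hnd arr.length le_rfl).2 arr.length le_rfl]
  constructor
  · exact fun h => h.1
  · intro hr
    refine ⟨hr, ?_⟩
    by_cases h0 : arr.length = 0
    · exact Or.inl h0
    · obtain ⟨i, hri, hsi⟩ := pv_reach_pred arr pieces arr.length hr h0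
      have hib := pv_step_bounds arr pieces hne i arr.length hsi
      exact Or.inr ⟨i, by omega, hri, hsi⟩

-- ---- A side: the greedy loop decides reachability of n ----

theorem canFormArray_bsearch_spec
    (sp : List (List Int)) (hp : sp.Pairwise (fun a b => a.headD 0 < b.headD 0))
    (v : Int) : ∀ (n : Nat) (l r : Int), (r - l + 1).toNat ≤ n → 0 ≤ l → r < (sp.length : Int) →
    (∀ (t : Nat) (ht : t < sp.length), (sp[t].headD 0 = v) → l ≤ (t : Int) ∧ (t : Int) ≤ r) →
    (∀ (t : Nat) (ht : t < sp.length), (sp[t].headD 0 = v) →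
        pvBsearchA v sp l r = (t : Int)) ∧
    ((∀ (t : Nat) (ht : t < sp.length), sp[t].headD 0 ≠ v) → pvBsearchA v sp l r = -1) := by
  have hidx : ∀ (i j : Nat) (hi : i < sp.length) (hj : j < sp.length), i < j →
      sp[i].headD 0 < sp[j].headD 0 := by
    intro i j hi hj hij
    exact List.pairwise_iff_getElem.mp hp i j hi hj hij
  intro n
  induction n with
  | zero =>
      intro l r hn h0 hr hinv
      have hlr : ¬ l ≤ r := by omega
      constructor
      · intro t ht hv
        exact absurd (hinv t ht hv) (by omega)
      · intro _
        rw [pvBsearchA.eq_def, dif_neg hlr]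
  | succ n ih =>
      intro l r hn h0 hr hinv
      by_cases hlr : l ≤ r
      · have hfd : PySem.Int.floordiv (r - l) 2 = (r - l) / 2 :=
          PySem.Int.floordiv_eq_ediv_of_pos (by omega)
        set mid := PySem.Int.floordiv (r - l) 2 + l with hmiddef
        have hml : l ≤ mid := by omega
        have hmr : mid ≤ r := by omega
        have hmidnat : mid.toNat < sp.length := by omega
        have hget : PySem.List.pyGetD sp mid [] = sp[mid.toNat] :=
          PySem.List.pyGetD_eq_getElem sp [] (by omega) (by omega)
        have heq : pvBsearchA v sp l r =
            (if sp[mid.toNat].headD 0 < v then pvBsearchA v sp (l + 1) r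
             else if v < sp[mid.toNat].headD 0 then pvBsearchA v sp l (r - 1)
             else mid) := by
          rw [pvBsearchA.eq_def, dif_pos hlr]
          simp only [← hmiddef, hget]
        rcases lt_trichotomy (sp[mid.toNat].headD 0) v with hc | hc | hc
        · -- first < v: move l up
          rw [heq, if_pos hc]
          have hinv' : ∀ (t : Nat) (ht : t < sp.length), (sp[t].headD 0 = v) →
              l + 1 ≤ (t : Int) ∧ (t : Int) ≤ r := by
            intro t ht hv
            obtain ⟨h1, h2⟩ := hinv t ht hv
            have hmt : mid < (t : Int) := by
              rcases lt_trichotomy (t : Int) mid with h | h | h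
              · have := hidx t mid.toNat ht hmidnat (by omega)
                omega
              · exfalso
                have h3 : sp[mid.toNat] = sp[t] := by congr 1; omega
                rw [h3] at hc; omega
              · exact h
            omega
          exact ih (l + 1) r (by omega) (by omega) hr hinv'
        · -- found
          constructor
          · intro t ht hv
            rw [heq, if_neg (by omega), if_neg (by omega)]
            rcases lt_trichotomy t mid.toNat with h | h | h
            · have := hidx t mid.toNat ht hmidnat h; omega
            · omega
            · have := hidx mid.toNat t hmidnat ht h; omega
          · intro hno
            exact absurd hc (hno mid.toNat hmidnat)
        · -- v < first: move r down
          rw [heq, if_neg (by omega), if_pos hc]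
          have hinv' : ∀ (t : Nat) (ht : t < sp.length), (sp[t].headD 0 = v) →
              l ≤ (t : Int) ∧ (t : Int) ≤ r - 1 := by
            intro t ht hv
            obtain ⟨h1, h2⟩ := hinv t ht hv
            have hmt : (t : Int) < mid := by
              rcases lt_trichotomy (t : Int) mid with h | h | h
              · exact h
              · exfalso
                have h3 : sp[mid.toNat] = sp[t] := by congr 1; omega
                rw [h3] at hc; omega
              · have := hidx mid.toNat t hmidnat ht (by omega)
                omega
            omega
          exact ih l (r - 1) (by omega) h0 (by omega) hinv'
      · constructor
        · intro t ht hv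
          exact absurd (hinv t ht hv) (by omega)
        · intro _
          rw [pvBsearchA.eq_def, dif_neg hlr]

theorem canFormArray_take_spec (arr : List Int) : ∀ (p : List Int) (i : Int), 0 ≤ i →
    (((arr.drop i.toNat).take p.length = p ∧ pvTakeA p arr i = some (i + (p.length : Int))) ∨
     ((arr.drop i.toNat).take p.length ≠ p ∧ pvTakeA p arr i = none)) := by
  intro p
  induction p with
  | nil => intro i hi; left; simp [pvTakeA]
  | cons x rest ih =>
      intro i hi
      by_cases hlen : i ≥ (arr.length : Int)
      · right
        constructor
        · have : arr.drop i.toNat = [] := by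
            apply List.drop_eq_nil_of_le; omega
          simp [this]
        · simp [pvTakeA, hlen]
      · rw [not_le] at hlen
        have hlt : i.toNat < arr.length := by omega
        have hdrop : arr.drop i.toNat = arr[i.toNat] :: arr.drop (i.toNat + 1) :=
          (List.getElem_cons_drop hlt).symm
        have hget : PySem.List.pyGetD arr i 0 = arr[i.toNat] :=
          PySem.List.pyGetD_eq_getElem arr 0 hi (by omega)
        have hnext : (i + 1).toNat = i.toNat + 1 := by omega
        by_cases hx : x = arr[i.toNat]
        · rcases ih (i + 1) (by omega) with ⟨h1, h2⟩ | ⟨h1, h2⟩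
          · left
            constructor
            · rw [List.length_cons, hdrop, List.take_succ_cons, ← hx]
              rw [hnext] at h1
              rw [h1]
            · simp only [pvTakeA, if_neg (by omega : ¬ i ≥ (arr.length : Int)), hget,
                if_pos hx, h2]
              congr 1
              simp only [List.length_cons]
              push_cast
              ring
          · right
            constructor
            · simp only [hdrop, List.length_cons, List.take_succ_cons]
              intro hc
              exact h1 (by simpa [hnext] using (List.cons.injEq _ _ _ _ ▸ hc).2)
            · simp only [pvTakeA, if_neg (by omega : ¬ i ≥ (arr.length : Int)), hget,
                if_pos hx, h2]
        · right
          constructor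
          · rw [List.length_cons, hdrop, List.take_succ_cons]
            intro hc
            exact hx ((List.cons.injEq _ _ _ _ ▸ hc).1).symm
          · simp only [pvTakeA, hget]
            rw [if_neg (by omega : ¬ i ≥ (arr.length : Int)), if_neg hx]

theorem pv_loopA_iff (arr : List Int) (pieces : List (List Int))
    (hne : ∀ p ∈ pieces, p ≠ []) (hnd : (pieces.map (fun p => p.headD 0)).Nodup) :
    ∀ (fuel : Nat) (i : Int), 0 ≤ i → i.toNat ≤ arr.length → arr.length < fuel + i.toNat →
    pvReach arr pieces i.toNat →
    (pvLoopA (PySem.List.sorted pieces (fun p => p.headD 0) false) arr fuel i = true ↔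
      pvReach arr pieces arr.length) := by
  have hperm := PySem.List.sorted_perm pieces (fun p => p.headD 0) false
  set sp := PySem.List.sorted pieces (fun p => p.headD 0) false with hspdef
  have hple : sp.Pairwise (fun a b => a.headD 0 ≤ b.headD 0) :=
    PySem.List.sorted_pairwise pieces (fun p => p.headD 0)
  have hndsp : (sp.map (fun p => p.headD 0)).Nodup :=
    ((hperm.map (fun p => p.headD 0)).nodup_iff).mpr hnd
  have hpne : sp.Pairwise (fun a b => a.headD 0 ≠ b.headD 0) := List.pairwise_map.mp hndsp
  have hp : sp.Pairwise (fun a b => a.headD 0 < b.headD 0) :=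
    (hple.and hpne).imp (fun h => lt_of_le_of_ne h.1 h.2)
  intro fuel
  induction fuel with
  | zero => intro i h0 hile hfuel _; omega
  | succ fuel ih =>
      intro i h0 hile hfuel hreach
      by_cases hilt : i < (arr.length : Int)
      · have hitn : i.toNat < arr.length := by omega
        have hv : PySem.List.pyGetD arr i 0 = arr[i.toNat] :=
          PySem.List.pyGetD_eq_getElem arr 0 h0 (by omega)
        have hvD : arr.getD i.toNat 0 = arr[i.toNat] := List.getD_eq_getElem arr 0 hitn
        simp only [pvLoopA, if_pos hilt]
        by_cases hex : ∃ p ∈ pieces, p.headD 0 = arr[i.toNat]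
        · obtain ⟨p, hpmem, hph⟩ := hex
          have hpsp : p ∈ sp := hperm.mem_iff.mpr hpmem
          obtain ⟨t, ht, hsp⟩ := List.mem_iff_getElem.mp hpsp
          have hbs := (canFormArray_bsearch_spec sp hp (PySem.List.pyGetD arr i 0)
              (((sp.length : Int) - 1 - 0 + 1).toNat) 0 ((sp.length : Int) - 1)
              le_rfl le_rfl (by omega)
              (fun t' ht' _ => ⟨by omega, by omega⟩)).1 t ht (by rw [hsp, hv, hph])
          have hgets : PySem.List.pyGetD sp ((t : Int)) [] = p := by
            rw [PySem.List.pyGetD_eq_getElem sp [] (by omega) (by exact_mod_cast ht)]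
            simpa using hsp
          simp only [hbs, if_neg (show ¬ ((t : Int) = -1) by omega), hgets]
          rcases canFormArray_take_spec arr p i h0 with ⟨h1, h2⟩ | ⟨h1, h2⟩
          · -- the piece matches: both sides step to i + |p|
            have hcond : pvCond arr i.toNat p = true := decide_eq_true h1
            have hfind := pv_find_some arr pieces hne hnd i.toNat p hpmem hcond
            have hstep : pvStep arr pieces i.toNat = some (i.toNat + p.length) := by
              unfold pvStep; rw [hfind]; rfl
            have hbnd := pv_step_bounds arr pieces hne _ _ hstep
            have hreach' : pvReach arr pieces (i.toNat + p.length) :=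
              pv_reach_succ arr pieces _ _ hreach hstep
            have hiN : (i + (p.length : Int)).toNat = i.toNat + p.length := by omega
            simp only [h2]
            exact ih (i + (p.length : Int)) (by omega) (by omega) (by omega)
              (by rw [hiN]; exact hreach')
          · -- the piece does not match: A stops, and no piece at all matches here
            have hnone : pieces.find? (pvCond arr i.toNat) = none := by
              apply List.find?_eq_none.mpr
              intro q hq hqc
              have hq' := of_decide_eq_true hqc
              have h2q := pv_match_head arr q i.toNat (hne q hq) hq'
              have h2p : q = p := by
                apply List.inj_on_of_nodup_map hnd hq hpmem
                rw [h2q.2.2, hvD, hph]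
              exact h1 (h2p ▸ hq')
            have hstep : pvStep arr pieces i.toNat = none := by
              unfold pvStep; rw [hnone]; rfl
            have hdead := pv_reach_le_of_dead arr pieces hne i.toNat hreach hstep
            rw [h2]
            show (false : Bool) = true ↔ pvReach arr pieces arr.length
            simp only [Bool.false_eq_true, false_iff]
            intro hr
            have := hdead arr.length hr
            omega
        · -- no piece starts with arr[i]: bsearch fails, and no piece matches here
          have hbs := (canFormArray_bsearch_spec sp hp (PySem.List.pyGetD arr i 0)
              (((sp.length : Int) - 1 - 0 + 1).toNat) 0 ((sp.length : Int) - 1)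
              le_rfl le_rfl (by omega)
              (fun t' ht' _ => ⟨by omega, by omega⟩)).2
            (fun t' ht' hc =>
              hex ⟨sp[t'], hperm.mem_iff.mp (sp.getElem_mem ht'), by rw [← hv]; exact hc⟩)
          have hnone : pieces.find? (pvCond arr i.toNat) = none := by
            apply List.find?_eq_none.mpr
            intro q hq hqc
            have hq' := of_decide_eq_true hqc
            have h2q := pv_match_head arr q i.toNat (hne q hq) hq'
            exact hex ⟨q, hq, by rw [h2q.2.2, hvD]⟩
          have hstep : pvStep arr pieces i.toNat = none := by
            unfold pvStep; rw [hnone]; rfl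
          have hdead := pv_reach_le_of_dead arr pieces hne i.toNat hreach hstep
          simp only [hbs]
          simp only [if_true]
          simp only [Bool.false_eq_true, false_iff]
          intro hr
          have := hdead arr.length hr
          omega
      · -- i = n: A returns True and n is reached
        have hin : i.toNat = arr.length := by omega
        simp only [pvLoopA, if_neg hilt, true_iff]
        exact hin ▸ hreach

-- ===== VERDICT (by name: the statement is the Claim_ definition above) =====
theorem canFormArray_spec : Claim_equal_canFormArray := by
  intro arr pieces _ hpre
  unfold Spec_canFormArray
  have hA := pv_loopA_iff arr pieces hpre.1 hpre.2 (arr.length + 1) 0 le_rfl (by simp)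
    (by simp) (pv_reach_zero arr pieces)
  have hB := pv_dp_result arr pieces hpre.1 hpre.2
  unfold canFormArray
  by_cases h : pvReach arr pieces arr.length
  · rw [hA.mpr h, hB.mpr h]
  · have h1 : pvLoopA (PySem.List.sorted pieces (fun p => p.headD 0) false) arr (arr.length + 1) 0 = false :=
      Bool.eq_false_iff.mpr (fun hh => h (hA.mp hh))
    have h2 : canFormArray_alt arr pieces = false :=
      Bool.eq_false_iff.mpr (fun hh => h (hB.mp hh))
    rw [h1, h2]
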